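-- pv_equiv track=rewrite | github.com/sas-dx/skill-report-web | docs/tools/unified/ai/analytics.py | _extract_data_structures
-- ===== SOURCE A (Python) =====
-- from typing import Dict, List, Any, Optional, Union, Tuple
--
-- def _extract_data_structures(content: str) -> Dict[str, str]:
--     """データ構造を抽出"""
--     # 簡単な実装：テーブル定義やインターフェース定義を抽出
--     structures = {}
--
--     lines = content.split('\n')
--     current_structure = None
--     current_definition = []
--
--     for line in lines:
--         if 'interface' in line.lower() or 'table' in line.lower():
--             if current_structure:
--                 structures[current_structure] = '\n'.join(current_definition)
--             current_structure = line.strip()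
--             current_definition = [line]
--         elif current_structure and (line.startswith('  ') or line.startswith('\t')):
--             current_definition.append(line)
--         elif current_structure and line.strip() == '':
--             continue
--         elif current_structure:
--             structures[current_structure] = '\n'.join(current_definition)
--             current_structure = None
--             current_definition = []
--
--     if current_structure:
--         structures[current_structure] = '\n'.join(current_definition)
--
--     return structures
-- ===== SOURCE B (Python) =====
-- def _extract_data_structures(content: str) -> dict:
--     """Index-based block scanner: find each header line, then consume its
--     indented block with an inner loop; store under the stripped header."""
--     structures = {}
--     lines = content.split('\n')
--     n = len(lines)
--     i = 0
--     while i < n: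
--         line = lines[i]
--         if 'interface' in line.lower() or 'table' in line.lower():
--             block = [line]
--             j = i + 1
--             while j < n:
--                 nxt = lines[j]
--                 if 'interface' in nxt.lower() or 'table' in nxt.lower():
--                     break
--                 if nxt.startswith('  ') or nxt.startswith('\t'):
--                     block.append(nxt)
--                 elif nxt.strip() == '':
--                     pass
--                 else:
--                     j += 1
--                     break
--                 j += 1
--             structures[line.strip()] = '\n'.join(block)
--             i = j
--         else:
--             i += 1
--     return structures
-- ===== Notes on version B (the rewrite author's own statement) =====
-- stated objective: alternative
-- what changed: Replaced the flat single loop carrying (current_structure, current_definition) state across every line by a two-level structure: an outer index loop that searches for header lines and an inner loop that consumes each header's block (indented lines appended, blanks skipped, stopped by the next header or a plain line), storing the block immediately.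
import Mathlib
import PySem

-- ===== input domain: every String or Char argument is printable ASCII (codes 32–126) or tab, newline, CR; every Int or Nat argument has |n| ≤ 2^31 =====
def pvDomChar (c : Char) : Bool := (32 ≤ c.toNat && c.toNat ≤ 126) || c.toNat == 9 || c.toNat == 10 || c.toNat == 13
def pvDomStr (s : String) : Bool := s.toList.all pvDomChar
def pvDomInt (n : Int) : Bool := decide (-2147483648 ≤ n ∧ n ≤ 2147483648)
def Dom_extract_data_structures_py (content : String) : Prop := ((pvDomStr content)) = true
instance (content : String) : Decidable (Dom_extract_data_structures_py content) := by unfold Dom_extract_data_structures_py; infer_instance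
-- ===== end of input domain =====

-- B replaces A's flat carried-state loop by an outer header-search loop with an
-- inner block-consuming scan (different decomposition, same cost; objective: alternative).

-- shared predicates (the very same tests both Python versions write inline)
def pvHdr (l : String) : Bool :=
  PySem.Str.isIn "interface" (PySem.Str.lower l) || PySem.Str.isIn "table" (PySem.Str.lower l)

def pvIndent (l : String) : Bool :=
  PySem.Str.startswith l "  " || PySem.Str.startswith l "\t"

def pvBlank (l : String) : Bool := PySem.Str.strip l == ""

-- ===== PORT A =====
-- state: (structures, current_structure, current_definition)
def pvAStep (st : PySem.Dict String String × Option String × List String) (line : String) :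
    PySem.Dict String String × Option String × List String :=
  match st with
  | (d, cur, defn) =>
    if pvHdr line then
      ((match cur with
        | some c => d.insert c (PySem.Str.join "\n" defn)
        | none => d), some (PySem.Str.strip line), [line])
    else if cur.isSome && pvIndent line then
      (d, cur, defn ++ [line])
    else if cur.isSome && pvBlank line then
      (d, cur, defn)
    else
      match cur with
      | some c => (d.insert c (PySem.Str.join "\n" defn), none, [])
      | none => (d, cur, defn)

def extract_data_structures_py (content : String) : List (String × String) :=
  let lines := (PySem.Str.split? content "\n").getD []
  let st := lines.foldl pvAStep ((PySem.Dict.empty : PySem.Dict String String), none, [])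
  (match st.2.1 with
   | some c => st.1.insert c (PySem.Str.join "\n" st.2.2)
   | none => st.1).items

-- ===== PORT B =====
-- inner while loop: consume the block following a header; returns (appended lines, remaining lines)
def pvConsume : List String → List String × List String
  | [] => ([], [])
  | l :: rest =>
    if pvHdr l then ([], l :: rest)
    else if pvIndent l then
      let p := pvConsume rest
      (l :: p.1, p.2)
    else if pvBlank l then pvConsume rest
    else ([], rest)

theorem pvConsume_len : ∀ (xs : List String), (pvConsume xs).2.length ≤ xs.length
  | [] => Nat.le_refl _
  | l :: rest => by
    simp only [pvConsume]
    split_ifs <;> simp <;> exact Nat.le_succ_of_le (pvConsume_len rest)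

-- outer while loop: scan for headers, one dict insert per block
def pvBLoop : List String → PySem.Dict String String → PySem.Dict String String
  | [], d => d
  | line :: rest, d =>
    if pvHdr line then
      let p := pvConsume rest
      pvBLoop p.2 (d.insert (PySem.Str.strip line) (PySem.Str.join "\n" (line :: p.1)))
    else pvBLoop rest d
  termination_by xs _ => xs.length
  decreasing_by
    · exact Nat.lt_succ_of_le (pvConsume_len rest)
    · exact Nat.lt_succ_self _

def extract_data_structures_py_alt (content : String) : List (String × String) :=
  let lines := (PySem.Str.split? content "\n").getD []
  (pvBLoop lines (PySem.Dict.empty : PySem.Dict String String)).items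

-- ===== PRECONDITION & SPEC =====
def Spec_extract_data_structures_py (content : String) (out : List (String × String)) : Prop := out = extract_data_structures_py_alt content
instance (content : String) (out : List (String × String)) : Decidable (Spec_extract_data_structures_py content out) := by unfold Spec_extract_data_structures_py; infer_instance

-- ===== CLAIM (what is proved, stated in full; the proofs are below) =====
def Claim_equal_extract_data_structures_py : Prop := ∀ (content : String), Dom_extract_data_structures_py content → Spec_extract_data_structures_py content (extract_data_structures_py content)

-- ===== LEMMAS AND PROOFS =====

-- finish A's loop state: the trailing "if current_structure:" insert
def pvFinish (st : PySem.Dict String String × Option String × List String) : PySem.Dict String String :=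
  match st.2.1 with
  | some c => st.1.insert c (PySem.Str.join "\n" st.2.2)
  | none => st.1

-- Joint invariant: A's fold from a "no current block" state equals B's outer loop,
-- and from an open-block state equals consume-then-insert-then-outer-loop.
theorem pvMain : ∀ (n : Nat) (lines : List String), lines.length ≤ n →
    (∀ d, pvFinish (lines.foldl pvAStep (d, none, [])) = pvBLoop lines d) ∧
    (∀ d c defn, pvFinish (lines.foldl pvAStep (d, some c, defn)) =
      pvBLoop (pvConsume lines).2
        (d.insert c (PySem.Str.join "\n" (defn ++ (pvConsume lines).1)))) := by
  intro n
  induction n with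
  | zero =>
    intro lines h
    have : lines = [] := List.eq_nil_of_length_eq_zero (Nat.le_zero.mp h)
    subst this
    exact ⟨fun d => by simp [pvFinish, pvBLoop], fun d c defn => by simp [pvFinish, pvConsume, pvBLoop]⟩
  | succ n ih =>
    intro lines h
    cases lines with
    | nil =>
      exact ⟨fun d => by simp [pvFinish, pvBLoop], fun d c defn => by simp [pvFinish, pvConsume, pvBLoop]⟩
    | cons l rest =>
      have hr : rest.length ≤ n := Nat.le_of_succ_le_succ h
      constructor
      · intro d
        by_cases hh : pvHdr l
        · simp only [List.foldl_cons, pvAStep, hh, if_pos]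
          rw [(ih rest hr).2 d (PySem.Str.strip l) [l]]
          rw [pvBLoop]
          simp [hh]
        · simp only [List.foldl_cons, pvAStep, hh, Option.isSome_none, Bool.false_and, Bool.false_eq_true, if_false]
          rw [(ih rest hr).1 d]
          rw [pvBLoop]
          simp [hh]
      · intro d c defn
        by_cases hh : pvHdr l
        · simp only [List.foldl_cons, pvAStep, hh, if_pos]
          rw [(ih rest hr).2 (d.insert c (PySem.Str.join "\n" defn)) (PySem.Str.strip l) [l]]
          conv_rhs => rw [pvConsume]
          simp only [hh, if_pos]
          rw [pvBLoop]
          simp [hh]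
        · by_cases hi : pvIndent l
          · simp only [List.foldl_cons, pvAStep, hh, hi, Option.isSome_some, Bool.true_and, Bool.false_eq_true, if_false, if_true]
            rw [(ih rest hr).2 d c (defn ++ [l])]
            conv_rhs => rw [pvConsume]
            simp [hh, hi]
          · by_cases hb : pvBlank l
            · simp only [List.foldl_cons, pvAStep, hh, hi, hb, Option.isSome_some, Bool.true_and, Bool.false_eq_true, if_false, if_true]
              rw [(ih rest hr).2 d c defn]
              conv_rhs => rw [pvConsume]
              simp [hh, hi, hb]
            · simp only [List.foldl_cons, pvAStep, hh, hi, hb, Option.isSome_some, Bool.true_and, Bool.false_eq_true, if_false]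
              rw [(ih rest hr).1 (d.insert c (PySem.Str.join "\n" defn))]
              conv_rhs => rw [pvConsume]
              simp [hh, hi, hb]

-- ===== VERDICT (by name: the statement is the Claim_ definition above) =====
theorem extract_data_structures_py_spec : Claim_equal_extract_data_structures_py := by
  intro content _
  unfold Spec_extract_data_structures_py extract_data_structures_py extract_data_structures_py_alt
  exact congrArg PySem.Dict.items
    ((pvMain _ _ (Nat.le_refl _)).1 PySem.Dict.empty)
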